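-- pv_equiv track=rewrite | github.com/jnsp/learn-to-code-by-solving-problems | ch05/wild_ride.py | waiting_days
-- ===== SOURCE A (Python) =====
-- def waiting_days(play_days: int, shoppings: list[str]) -> int:
--     boxes: list[str] = []
--
--     for item in shoppings:
--         if item == "B":
--             boxes += ["B"] * play_days
--         if boxes:
--             boxes.pop()
--
--     return len(boxes)
-- ===== SOURCE B (Python) =====
-- def waiting_days(play_days: int, shoppings: list[str]) -> int:
--     # Reverse scan: the simulation is c_j = max(0, c_{j-1} + delta_j), whose
--     # result is the maximum suffix sum of the daily deltas.
--     s = 0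
--     best = 0
--     for item in reversed(shoppings):
--         s += (max(0, play_days) - 1) if item == "B" else -1
--         if s > best:
--             best = s
--     return best
-- ===== Notes on version B (the rewrite author's own statement) =====
-- stated objective: alternative
-- what changed: Replaces the box-list simulation by the observation that the count follows c = max(0, c + delta); B does a single reverse scan over per-day deltas keeping a running suffix sum and its maximum, maintaining no list of boxes.
import Mathlib
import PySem

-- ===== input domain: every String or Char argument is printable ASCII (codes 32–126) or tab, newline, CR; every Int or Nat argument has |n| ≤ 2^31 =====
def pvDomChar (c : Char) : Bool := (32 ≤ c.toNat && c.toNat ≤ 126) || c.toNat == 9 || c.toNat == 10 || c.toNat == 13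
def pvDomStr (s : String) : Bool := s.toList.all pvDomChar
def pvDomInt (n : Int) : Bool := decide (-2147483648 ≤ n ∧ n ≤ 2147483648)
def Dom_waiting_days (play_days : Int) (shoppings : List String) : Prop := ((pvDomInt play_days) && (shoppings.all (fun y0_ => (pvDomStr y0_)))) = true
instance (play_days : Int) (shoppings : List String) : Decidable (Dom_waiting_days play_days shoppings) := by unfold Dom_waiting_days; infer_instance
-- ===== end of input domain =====

-- B replaces the box-list simulation by a reverse scan over per-day deltas tracking the
-- maximum suffix sum (alternative algorithm; no list of boxes is maintained).

-- ===== PORT A =====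
-- boxes += ["B"] * play_days ; if boxes: boxes.pop()
def waiting_days (play_days : Int) (shoppings : List String) : Int :=
  let boxes : List String :=
    shoppings.foldl (fun boxes item =>
      let boxes := if item == "B" then boxes ++ PySem.List.pyRepeat ["B"] play_days else boxes
      if boxes.isEmpty then boxes else boxes.dropLast) []
  (boxes.length : Int)

-- ===== PORT B =====
def waiting_days_alt (play_days : Int) (shoppings : List String) : Int :=
  let r := shoppings.reverse.foldl (fun (p : Int × Int) item =>
      let s := p.1 + (if item == "B" then max 0 play_days - 1 else -1)
      (s, if s > p.2 then s else p.2)) (0, 0)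
  r.2

-- ===== PRECONDITION & SPEC =====
def Spec_waiting_days (play_days : Int) (shoppings : List String) (out : Int) : Prop := out = waiting_days_alt play_days shoppings
instance (play_days : Int) (shoppings : List String) (out : Int) : Decidable (Spec_waiting_days play_days shoppings out) := by unfold Spec_waiting_days; infer_instance

-- ===== CLAIM (what is proved, stated in full; the proofs are below) =====
def Claim_equal_waiting_days : Prop := ∀ (play_days : Int) (shoppings : List String), Dom_waiting_days play_days shoppings → Spec_waiting_days play_days shoppings (waiting_days play_days shoppings)

-- ===== LEMMAS AND PROOFS =====

-- per-day delta
def pvDelta (play_days : Int) (item : String) : Int :=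
  if item == "B" then max 0 play_days - 1 else -1

-- sum of deltas of a list
def pvS (play_days : Int) : List String → Int
  | [] => 0
  | x :: l => pvDelta play_days x + pvS play_days l

-- maximum suffix sum (including the empty suffix)
def pvM (play_days : Int) : List String → Int
  | [] => 0
  | x :: l => max (pvDelta play_days x + pvS play_days l) (pvM play_days l)

theorem pvS_le_pvM (play_days : Int) (l : List String) :
    pvS play_days l ≤ pvM play_days l := by
  cases l with
  | nil => simp [pvS, pvM]
  | cons x l => simp [pvS, pvM]

-- the Nat-count view of A's loop body
def pvG (play_days : Int) (item : String) : Nat :=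
  if item == "B" then play_days.toNat else 0

def pvNF (play_days : Int) : Nat → List String → Nat
  | n, [] => n
  | n, x :: l => pvNF play_days ((n + pvG play_days x) - 1) l

theorem pvA_length (play_days : Int) (l : List String) (boxes : List String) :
    (l.foldl (fun boxes item =>
      let boxes := if item == "B" then boxes ++ PySem.List.pyRepeat ["B"] play_days else boxes
      if boxes.isEmpty then boxes else boxes.dropLast) boxes).length
    = pvNF play_days boxes.length l := by
  induction l generalizing boxes with
  | nil => simp [pvNF]
  | cons x l ih =>
    simp only [List.foldl_cons, ih, pvNF]
    congr 1
    by_cases hx : x == "B" <;>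
      simp [hx, pvG, PySem.List.pyRepeat_singleton, List.isEmpty_iff] <;>
      split <;> simp_all [List.length_dropLast] <;> try omega

theorem pvNF_eq (play_days : Int) (l : List String) (n : Nat) :
    (pvNF play_days n l : Int) = max ((n : Int) + pvS play_days l) (pvM play_days l) := by
  induction l generalizing n with
  | nil => simp [pvNF, pvS, pvM]
  | cons x l ih =>
    have hS := pvS_le_pvM play_days l
    have hx : ((((n + pvG play_days x) - 1 : Nat)) : Int)
        = max 0 ((n : Int) + pvDelta play_days x) := by
      by_cases hB : x == "B" <;> simp [pvG, pvDelta, hB] <;> omega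
    simp only [pvNF, ih, pvS, pvM, hx]
    omega

-- B's reverse foldl is a foldr computing (sum, max-suffix-sum)
theorem pvB_foldr (play_days : Int) (l : List String) :
    l.foldr (fun item (p : Int × Int) =>
      let s := p.1 + pvDelta play_days item
      (s, if s > p.2 then s else p.2)) (0, 0)
    = (pvS play_days l, pvM play_days l) := by
  induction l with
  | nil => simp [pvS, pvM]
  | cons x l ih =>
    have hS := pvS_le_pvM play_days l
    simp only [List.foldr_cons, ih, pvS, pvM]
    rw [Prod.mk.injEq]
    refine ⟨by omega, ?_⟩
    simp only [gt_iff_lt]; split <;> omega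

-- ===== VERDICT (by name: the statement is the Claim_ definition above) =====
theorem waiting_days_spec : Claim_equal_waiting_days := by
  intro play_days shoppings _
  unfold Spec_waiting_days waiting_days waiting_days_alt
  have hB := pvB_foldr play_days shoppings
  simp only [pvDelta] at hB
  simp only [List.foldl_reverse, hB, pvA_length play_days shoppings [], List.length_nil]
  rw [pvNF_eq]
  have := pvS_le_pvM play_days shoppings
  simp
  omega
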